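-- pv_equiv track=rewrite | github.com/admin-sosys/TokenKeeper | src/tokenkeeper/ingestion.py | _python_line_fallback
-- ===== SOURCE A (Python) =====
-- def _char_offset_for_line(lines: list[str], line_num: int) -> int:
--     """Compute the character offset of the start of a 1-based line number."""
--     offset = 0
--     for i in range(line_num - 1):
--         offset += len(lines[i]) + 1  # +1 for newline
--     return offset
--
-- def _python_line_fallback(
--     content: str,
--     lines: list[str],
--     chunk_size: int,
-- ) -> list[tuple[str, int, int, str, str, int, int]]:
--     """Line-based fallback for Python files that fail AST parsing."""
--     chunks: list[tuple[str, int, int, str, str, int, int]] = []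
--     current_lines: list[str] = []
--     current_start = 1
--     current_chars = 0
--
--     for i, line in enumerate(lines):
--         line_len = len(line) + 1
--         if current_chars + line_len > chunk_size and current_lines:
--             text = "\n".join(current_lines).rstrip()
--             char_start = _char_offset_for_line(lines, current_start)
--             chunks.append((text, char_start, char_start + len(text),
--                            "", "module", current_start, current_start + len(current_lines) - 1))
--             current_lines = [line]
--             current_start = i + 1
--             current_chars = line_len
--         else:
--             current_lines.append(line)
--             current_chars += line_len
--
--     if current_lines:
--         text = "\n".join(current_lines).rstrip()
--         char_start = _char_offset_for_line(lines, current_start)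
--         chunks.append((text, char_start, char_start + len(text),
--                        "", "module", current_start, current_start + len(current_lines) - 1))
--
--     return chunks
-- ===== SOURCE B (Python) =====
-- def _python_line_fallback(
--     content: str,
--     lines: list[str],
--     chunk_size: int,
-- ) -> list[tuple[str, int, int, str, str, int, int]]:
--     """Staged: prefix sums, then chunk boundaries, then emit chunks from boundary pairs."""
--     n = len(lines)
--     if n == 0:
--         return []
--     # stage 1: prefix sums of len(line) + 1
--     pre = [0]
--     for line in lines:
--         pre.append(pre[-1] + len(line) + 1)
--     # stage 2: greedy chunk start indices (0-based)
--     starts = [0]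
--     for i in range(1, n):
--         if pre[i + 1] - pre[starts[-1]] > chunk_size:
--             starts.append(i)
--     # stage 3: emit one chunk per boundary pair
--     out = []
--     for s, e in zip(starts, starts[1:] + [n]):
--         text = "\n".join(lines[s:e]).rstrip()
--         out.append((text, pre[s], pre[s] + len(text), "", "module", s + 1, e))
--     return out
-- ===== Notes on version B (the rewrite author's own statement) =====
-- stated objective: faster
-- what changed: B replaces A's single accumulating pass (which rescans lines from the top for every emitted chunk via _char_offset_for_line and carries a growing current_lines buffer) by three staged passes: a prefix-sum array of character offsets, a greedy pass computing only the chunk start indices, and an emission pass over consecutive boundary pairs.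
import Mathlib
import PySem

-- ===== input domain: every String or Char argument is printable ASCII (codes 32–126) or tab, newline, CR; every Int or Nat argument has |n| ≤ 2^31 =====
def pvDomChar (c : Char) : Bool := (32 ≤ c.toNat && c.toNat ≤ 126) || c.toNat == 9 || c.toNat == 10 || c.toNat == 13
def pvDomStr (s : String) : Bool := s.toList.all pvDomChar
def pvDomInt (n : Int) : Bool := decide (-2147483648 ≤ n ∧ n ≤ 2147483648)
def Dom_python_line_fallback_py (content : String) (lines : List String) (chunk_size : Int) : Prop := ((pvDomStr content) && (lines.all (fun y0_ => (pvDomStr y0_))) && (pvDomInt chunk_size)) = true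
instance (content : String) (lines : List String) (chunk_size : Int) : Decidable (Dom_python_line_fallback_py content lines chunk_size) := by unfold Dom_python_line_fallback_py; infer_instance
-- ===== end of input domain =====

-- B replaces A's single accumulating pass (which rescans `lines` from the top for every emitted
-- chunk via _char_offset_for_line) by three staged passes: a prefix-sum array of character
-- offsets, a greedy pass computing only the chunk start indices, and an emission pass over
-- consecutive boundary pairs; measured faster (asymptotic: A is O(n^2) worst case over the
-- number of lines, B is O(n) in list operations).

-- ===== PORT A =====
-- helper _char_offset_for_line; lines[i] is always in range at A's call sites (line_num - 1 ≤ len(lines)),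
-- so the pyGetD default "" never fires.
def pvCharOffsetForLine (lines : List String) (lineNum : Int) : Int :=
  (PySem.List.pyRange 0 (lineNum - 1) 1).foldl
    (fun offset i => offset + PySem.Str.len (PySem.List.pyGetD lines i "") + 1) 0

-- one iteration of A's for-loop; state = (chunks, current_lines, current_start, current_chars)
def pvAStep (lines : List String) (chunk_size : Int)
    (s : List (String × Int × Int × String × String × Int × Int) × List String × Int × Int)
    (p : Int × String) :
    List (String × Int × Int × String × String × Int × Int) × List String × Int × Int :=
  let lineLen : Int := PySem.Str.len p.2 + 1
  if s.2.2.2 + lineLen > chunk_size ∧ s.2.1 ≠ [] then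
    let text := PySem.Str.rstrip (PySem.Str.join "\n" s.2.1)
    let charStart := pvCharOffsetForLine lines s.2.2.1
    (s.1 ++ [(text, charStart, charStart + PySem.Str.len text, "", "module", s.2.2.1,
              s.2.2.1 + s.2.1.length - 1)],
     [p.2], p.1 + 1, lineLen)
  else
    (s.1, s.2.1 ++ [p.2], s.2.2.1, s.2.2.2 + lineLen)

-- A's trailing 'if current_lines:' block
def pvFinishA (lines : List String)
    (s : List (String × Int × Int × String × String × Int × Int) × List String × Int × Int) :
    List (String × Int × Int × String × String × Int × Int) :=
  if s.2.1 ≠ [] then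
    let text := PySem.Str.rstrip (PySem.Str.join "\n" s.2.1)
    let charStart := pvCharOffsetForLine lines s.2.2.1
    s.1 ++ [(text, charStart, charStart + PySem.Str.len text, "", "module", s.2.2.1,
             s.2.2.1 + s.2.1.length - 1)]
  else s.1

def python_line_fallback_py (content : String) (lines : List String) (chunk_size : Int) :
    List (String × Int × Int × String × String × Int × Int) :=
  pvFinishA lines ((PySem.List.enumerate lines 0).foldl (pvAStep lines chunk_size) ([], [], 1, 0))

-- ===== PORT B =====
-- stage 1: prefix sums pre[k] = sum of len(line)+1 over lines[:k]
def pvPre (lines : List String) : List Int :=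
  lines.foldl (fun p line => p ++ [PySem.List.pyGetD p (-1) 0 + PySem.Str.len line + 1]) [0]

-- stage 2: one greedy step deciding whether line i opens a new chunk (starts[-1] is the last start)
def pvStartsStep (pre : List Int) (chunk_size : Int) (st : List Int) (i : Int) : List Int :=
  if PySem.List.pyGetD pre (i + 1) 0 - PySem.List.pyGetD pre (PySem.List.pyGetD st (-1) 0) 0 > chunk_size
  then st ++ [i] else st

-- stage 3: emit the chunk for one boundary pair (s, e)
def pvEmit (lines : List String) (pre : List Int) (b : Int × Int) :
    String × Int × Int × String × String × Int × Int :=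
  let text := PySem.Str.rstrip (PySem.Str.join "\n" (PySem.List.slice lines (some b.1) (some b.2)))
  (text, PySem.List.pyGetD pre b.1 0, PySem.List.pyGetD pre b.1 0 + PySem.Str.len text,
   "", "module", b.1 + 1, b.2)

def python_line_fallback_py_alt (content : String) (lines : List String) (chunk_size : Int) :
    List (String × Int × Int × String × String × Int × Int) :=
  if lines.length = 0 then []
  else
    let pre := pvPre lines
    let starts := (PySem.List.pyRange 1 (lines.length : Int) 1).foldl
                    (pvStartsStep pre chunk_size) [0]
    (starts.zip (starts.drop 1 ++ [(lines.length : Int)])).foldl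
      (fun out b => out ++ [pvEmit lines pre b]) []

-- ===== PRECONDITION & SPEC =====
def Spec_python_line_fallback_py (content : String) (lines : List String) (chunk_size : Int) (out : List (String × Int × Int × String × String × Int × Int)) : Prop := out = python_line_fallback_py_alt content lines chunk_size
instance (content : String) (lines : List String) (chunk_size : Int) (out : List (String × Int × Int × String × String × Int × Int)) : Decidable (Spec_python_line_fallback_py content lines chunk_size out) := by
  unfold Spec_python_line_fallback_py
  have h7 : DecidableEq (String × Int × Int × String × String × Int × Int) := by
    intro a b
    have h6 : Decidable (a.2 = b.2) := by infer_instance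
    have h1 : Decidable (a.1 = b.1) := by infer_instance
    have : Decidable (a.1 = b.1 ∧ a.2 = b.2) := by infer_instance
    exact decidable_of_iff _ Prod.ext_iff.symm
  exact @List.hasDecEq _ h7 _ _

-- ===== CLAIM (what is proved, stated in full; the proofs are below) =====
def Claim_equal_python_line_fallback_py : Prop := ∀ (content : String) (lines : List String) (chunk_size : Int), Dom_python_line_fallback_py content lines chunk_size → Spec_python_line_fallback_py content lines chunk_size (python_line_fallback_py content lines chunk_size)

-- ===== LEMMAS AND PROOFS =====

-- total of len(line) + 1 over a list of lines
def pvCost (l : List String) : Int := (l.map (fun s => PySem.Str.len s + 1)).sum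

-- consecutive boundary pairs of a starts list, closed by n
def pvPairs (L : List Int) (n : Int) : List (Int × Int) := L.zip (L.drop 1 ++ [n])

theorem pvCost_append (a b : List String) : pvCost (a ++ b) = pvCost a + pvCost b := by
  simp [pvCost]

theorem pvCost_take_succ (lines : List String) (k : Nat) (hk : k < lines.length) :
    pvCost (lines.take (k + 1)) = pvCost (lines.take k) + PySem.Str.len lines[k] + 1 := by
  have h : lines.take (k + 1) = lines.take k ++ [lines[k]] := by
    rw [List.take_add_one, List.getElem?_eq_getElem hk]; rfl
  rw [h, pvCost_append]
  simp [pvCost]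
  ring

theorem pvPre_eq (lines : List String) :
    pvPre lines = (List.range (lines.length + 1)).map (fun k => pvCost (lines.take k)) := by
  induction lines using List.reverseRecOn with
  | nil => simp [pvPre, pvCost]
  | append_singleton ls x ih =>
    unfold pvPre at ih ⊢
    rw [List.foldl_append, ih, List.foldl_cons, List.foldl_nil]
    have hlast : PySem.List.pyGetD ((List.range (ls.length + 1)).map (fun k => pvCost (ls.take k))) (-1) 0 = pvCost ls := by
      rw [List.range_succ, List.map_append, List.map_singleton,
          PySem.List.pyGetD_neg_one_append_singleton]
      simp
    rw [hlast, show (ls ++ [x]).length = ls.length + 1 by simp,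
        List.range_succ (n := ls.length + 1), List.map_append]
    congr 1
    · apply List.map_congr_left
      intro k hk
      have hk' : k ≤ ls.length := Nat.lt_succ_iff.mp (List.mem_range.mp hk)
      rw [List.take_append_of_le_length hk']
    · rw [List.map_singleton, List.take_of_length_le (by simp), pvCost_append]
      simp [pvCost]
      ring

theorem pvPreGet (lines : List String) (k : Nat) (hk : k ≤ lines.length) :
    PySem.List.pyGetD (pvPre lines) ((k : Int)) 0 = pvCost (lines.take k) := by
  rw [pvPre_eq, PySem.List.pyGetD_natCast]
  rw [List.getD_eq_getElem?_getD, List.getElem?_map, List.getElem?_range (by omega)]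
  rfl

theorem pv_fold_range (lines : List String) :
    ∀ (m : Nat), m ≤ lines.length →
    ((List.range m).map (fun k : Nat => (k : Int))).foldl
      (fun offset i => offset + PySem.Str.len (PySem.List.pyGetD lines i "") + 1) 0
    = pvCost (lines.take m) := by
  intro m
  induction m with
  | zero => intro _; simp [pvCost]
  | succ n ih =>
    intro hm
    have hn : n < lines.length := by omega
    rw [List.range_succ, List.map_append, List.foldl_append, ih (by omega)]
    have hg : PySem.List.pyGetD lines ((n : Nat) : Int) "" = lines[n] := by
      rw [PySem.List.pyGetD_eq_getElem lines "" (by positivity) (by exact_mod_cast hn)]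
      simp
    rw [pvCost_take_succ lines n hn]
    simp [hg]

theorem pvCharOffsetForLine_eq (lines : List String) (m : Nat) (hm : m ≤ lines.length) :
    pvCharOffsetForLine lines ((m : Int) + 1) = pvCost (lines.take m) := by
  unfold pvCharOffsetForLine
  rw [show ((m : Int) + 1 - 1) = (m : Int) by ring, PySem.List.pyRange_zero_natCast]
  exact pv_fold_range lines m hm

-- the greedy-starts fold only ever appends: a prefix before the last element passes through
theorem pvStFold_shift (pre : List Int) (cs : Int) :
    ∀ (r : List Int) (P : List Int) (s : Int) (t : List Int),
    r.foldl (pvStartsStep pre cs) (P ++ s :: t) = P ++ r.foldl (pvStartsStep pre cs) (s :: t) := by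
  intro r
  induction r with
  | nil => intro P s t; simp
  | cons i r ih =>
    intro P s t
    rw [List.foldl_cons, List.foldl_cons]
    have hne : (s :: t : List Int) ≠ [] := by simp
    have hsp : (s :: t : List Int) = (s :: t).dropLast ++ [(s :: t).getLast hne] :=
      (List.dropLast_append_getLast hne).symm
    have hlast : PySem.List.pyGetD (P ++ s :: t) (-1) 0 = PySem.List.pyGetD (s :: t) (-1) 0 := by
      conv_lhs => rw [hsp, ← List.append_assoc, PySem.List.pyGetD_neg_one_append_singleton]
      conv_rhs => rw [hsp, PySem.List.pyGetD_neg_one_append_singleton]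
    unfold pvStartsStep
    rw [hlast]
    split_ifs with hc
    · rw [List.append_assoc, List.cons_append]
      exact ih P s (t ++ [i])
    · exact ih P s t

-- the head of the accumulator is preserved by the greedy-starts fold
theorem pvStFold_cons (pre : List Int) (cs : Int) :
    ∀ (r : List Int) (s : Int) (t : List Int),
    ∃ t', r.foldl (pvStartsStep pre cs) (s :: t) = s :: t' := by
  intro r
  induction r with
  | nil => intro s t; exact ⟨t, rfl⟩
  | cons i r ih =>
    intro s t
    rw [List.foldl_cons]
    unfold pvStartsStep
    split_ifs with hc
    · rw [List.cons_append]
      exact ih s (t ++ [i])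
    · exact ih s t

theorem pv_main (lines : List String) (cs : Int) :
    ∀ (rest : List String) (k startN : Nat)
      (chunks : List (String × Int × Int × String × String × Int × Int)),
    rest = lines.drop k → k ≤ lines.length → startN < k →
    pvFinishA lines ((PySem.List.enumerate rest (k : Int)).foldl (pvAStep lines cs)
        (chunks, (lines.drop startN).take (k - startN), (startN : Int) + 1,
         pvCost ((lines.drop startN).take (k - startN))))
    = chunks ++
      (pvPairs ((PySem.List.pyRange (k : Int) (lines.length : Int) 1).foldl
          (pvStartsStep (pvPre lines) cs) [(startN : Int)]) (lines.length : Int)).map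
        (pvEmit lines (pvPre lines)) := by
  intro rest
  induction rest with
  | nil =>
    intro k startN chunks hrest hk hsk
    have hkl : k = lines.length := by
      have := List.drop_eq_nil_iff.mp hrest.symm
      omega
    rw [PySem.List.pyRange_one_eq_nil (by exact_mod_cast hkl.ge)]
    simp only [PySem.List.enumerate_nil, List.foldl_nil]
    have hcur : (lines.drop startN).take (k - startN) = lines.drop startN := by
      apply List.take_of_length_le
      simp
      omega
    have hne : lines.drop startN ≠ [] := by
      rw [ne_eq, List.drop_eq_nil_iff]; omega
    rw [hcur]
    simp only [pvFinishA]
    rw [if_pos hne]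
    have hpairs : pvPairs [(startN : Int)] (lines.length : Int)
        = [((startN : Int), (lines.length : Int))] := rfl
    rw [hpairs, List.map_singleton]
    have hslice : PySem.List.slice lines (some (startN : Int)) (some ((lines.length : Nat) : Int))
        = lines.drop startN := by
      rw [PySem.List.slice_natCast]
      apply List.take_of_length_le
      simp
    have hlastc : (startN : Int) + 1 + ((lines.drop startN).length : Int) - 1
        = ((lines.length : Nat) : Int) := by
      rw [List.length_drop]
      omega
    simp only [pvEmit, hslice, pvPreGet lines startN (by omega),
      pvCharOffsetForLine_eq lines startN (by omega), hlastc]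
  | cons hd tl ih =>
    intro k startN chunks hrest hk hsk
    have hklt : k < lines.length := by
      by_contra h
      rw [List.drop_eq_nil_iff.mpr (by omega)] at hrest
      exact List.cons_ne_nil _ _ hrest
    have hdrop : lines.drop k = lines[k] :: lines.drop (k + 1) :=
      (List.getElem_cons_drop hklt).symm
    rw [hdrop] at hrest
    obtain ⟨hhd, htl⟩ : hd = lines[k] ∧ tl = lines.drop (k + 1) := by
      constructor <;> [exact (List.cons.injEq .. ▸ hrest).1; exact (List.cons.injEq .. ▸ hrest).2]
    have hcurlen : ((lines.drop startN).take (k - startN)).length = k - startN := by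
      simp
      omega
    have hcurne : (lines.drop startN).take (k - startN) ≠ [] := by
      intro h; rw [h] at hcurlen; simp at hcurlen; omega
    have hchars : pvCost (lines.take k)
        = pvCost (lines.take startN) + pvCost ((lines.drop startN).take (k - startN)) := by
      have h1 : lines.take k = lines.take startN ++ (lines.drop startN).take (k - startN) := by
        rw [← List.take_add]
        congr 1
        omega
      rw [h1, pvCost_append]
    have hsingle : PySem.List.pyGetD [(startN : Int)] (-1) 0 = (startN : Int) :=
      PySem.List.pyGetD_neg_one_append_singleton (xs := []) (x := (startN : Int)) (d := 0)
    have hpre1 : PySem.List.pyGetD (pvPre lines) ((k : Int) + 1) 0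
        = pvCost (lines.take k) + PySem.Str.len lines[k] + 1 := by
      rw [show (k : Int) + 1 = ((k + 1 : Nat) : Int) by push_cast; ring,
          pvPreGet lines (k + 1) (by omega), pvCost_take_succ lines k hklt]
    have hpre0 : PySem.List.pyGetD (pvPre lines) ((startN : Int)) 0
        = pvCost (lines.take startN) := pvPreGet lines startN (by omega)
    rw [PySem.List.pyRange_one_cons (by exact_mod_cast hklt)]
    simp only [PySem.List.enumerate_cons, List.foldl_cons, pvAStep, pvStartsStep]
    rw [hsingle, hpre1, hpre0]
    by_cases hc : pvCost ((lines.drop startN).take (k - startN)) + (PySem.Str.len hd + 1) > cs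
    · -- flush on both sides
      rw [if_pos ⟨hc, hcurne⟩, if_pos (by rw [hhd] at hc; omega)]
      have hsplit : ([(startN : Int)] ++ [(k : Int)] : List Int)
          = [(startN : Int)] ++ (k : Int) :: [] := rfl
      rw [hsplit, pvStFold_shift]
      obtain ⟨t', hT⟩ := pvStFold_cons (pvPre lines) cs
        (PySem.List.pyRange ((k : Int) + 1) (lines.length : Int) 1) (k : Int) []
      rw [hT]
      simp only [List.singleton_append]
      have hpairs : pvPairs ((startN : Int) :: (k : Int) :: t') (lines.length : Int)
          = ((startN : Int), (k : Int)) :: pvPairs ((k : Int) :: t') (lines.length : Int) := rfl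
      rw [hpairs, List.map_cons]
      have hemit : pvEmit lines (pvPre lines) ((startN : Int), (k : Int))
          = (PySem.Str.rstrip (PySem.Str.join "\n" ((lines.drop startN).take (k - startN))),
             pvCharOffsetForLine lines ((startN : Int) + 1),
             pvCharOffsetForLine lines ((startN : Int) + 1) +
               PySem.Str.len (PySem.Str.rstrip
                 (PySem.Str.join "\n" ((lines.drop startN).take (k - startN)))),
             "", "module", (startN : Int) + 1,
             (startN : Int) + 1 + (((lines.drop startN).take (k - startN)).length : Int) - 1) := by
        have hlastc : (startN : Int) + 1 + (((lines.drop startN).take (k - startN)).length : Int) - 1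
            = (k : Int) := by
          rw [hcurlen]
          omega
        simp only [pvEmit, PySem.List.slice_natCast, hpre0,
          pvCharOffsetForLine_eq lines startN (by omega), hlastc]
      have hnext : (lines.drop k).take ((k + 1) - k) = [hd] := by
        rw [show (k + 1) - k = 1 by omega, hdrop, hhd]
        rfl
      have H := ih (k + 1) k
        (chunks ++ [pvEmit lines (pvPre lines) ((startN : Int), (k : Int))])
        htl (by omega) (by omega)
      rw [hnext, show (((k + 1 : Nat)) : Int) = (k : Int) + 1 by push_cast; ring] at H
      rw [hT] at H
      have hc1 : pvCost [hd] = PySem.Str.len hd + 1 := by simp [pvCost]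
      rw [hc1] at H
      rw [hemit] at H ⊢
      rw [H, List.append_assoc, List.singleton_append]
    · -- keep accumulating on both sides
      rw [if_neg (by tauto), if_neg (by rw [hhd] at hc; omega)]
      have hcur1 : (lines.drop startN).take ((k + 1) - startN)
          = (lines.drop startN).take (k - startN) ++ [hd] := by
        have h1 : (k + 1) - startN = (k - startN) + 1 := by omega
        rw [h1, List.take_add_one, List.getElem?_drop]
        rw [show startN + (k - startN) = k by omega, List.getElem?_eq_getElem hklt]
        simp [hhd]
      have H := ih (k + 1) startN chunks htl (by omega) (by omega)
      rw [hcur1, pvCost_append, show (((k + 1 : Nat)) : Int) = (k : Int) + 1 by push_cast; ring] at H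
      have hc1 : pvCost [hd] = PySem.Str.len hd + 1 := by simp [pvCost]
      rw [hc1] at H
      exact H

-- ===== VERDICT (by name: the statement is the Claim_ definition above) =====
theorem python_line_fallback_py_spec : Claim_equal_python_line_fallback_py := by
  intro content lines chunk_size _hdom
  unfold Spec_python_line_fallback_py python_line_fallback_py python_line_fallback_py_alt
  cases lines with
  | nil => simp [PySem.List.enumerate, pvFinishA]
  | cons l0 ls =>
    rw [if_neg (by simp)]
    dsimp only
    simp only [PySem.List.enumerate_cons, List.foldl_cons, pvAStep]
    rw [if_neg (by simp)]
    have H := pv_main (l0 :: ls) chunk_size ls 1 0 [] (by simp) (by simp) (by omega)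
    simp only [List.drop_zero, Nat.sub_zero, Nat.cast_zero, Nat.cast_one,
      List.take_succ_cons, List.take_zero] at H
    have hc1 : pvCost [l0] = PySem.Str.len l0 + 1 := by simp [pvCost]
    rw [hc1, List.nil_append] at H
    simp only [List.length_cons] at H
    simp only [List.nil_append, zero_add, List.length_cons]
    rw [PySem.List.foldl_append_singleton_eq_map, List.nil_append]
    exact H
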